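-- pv_equiv track=rewrite | github.com/fransab/ExFaM | pages/roommate_funcs/roommate_sat.py | get_matching
-- ===== SOURCE A (Python) =====
-- def get_ij_from_k(k,human=False):
--     """
--     Retrieve X_(i,j) from X_k with symmetry
--     """
--     pos = k > 0
--     k = abs(k)
--     i = 1
--     while k > i*(i+1) / 2:
--         i += 1
--     j = int( k - (i-1)*i / 2 - 1)
--     if human:
--         return (i+1,j+1,pos)
--     return (i,j,pos)
--
-- def get_matching(model):
--     """
--     Retrieve a matching from the model of a CNF with symmetry and ensure it is valid
--     """
--     matching = {}
--
--     for var in model: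
--         a,b,positive = get_ij_from_k(var)
--         # a,b = val[abs(var)]
--         if positive:
--             if a in matching and matching[a] != b: raise ValueError("Matching inconsistant1")
--             else:                                  matching[a] = b
--             if b in matching and matching[b] != a: raise ValueError("Matching inconsistant2")
--             else:                                  matching[b] = a
--         else:
--             if a in matching and matching[a] == b: raise ValueError("Matching inconsistant3")
--             if b in matching and matching[b] == a: raise ValueError("Matching inconsistant4")
--
--     return matching
-- ===== SOURCE B (Python) =====
-- def get_ij_from_k_fast(k):
--     """Decode X_k to X_(i,j): invert the triangular numbering by binary search."""
--     pos = k > 0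
--     k = abs(k)
--     lo = 1
--     hi = k if k > 1 else 1
--     while lo < hi:
--         mid = (lo + hi) // 2
--         if 2 * k <= mid * (mid + 1):
--             hi = mid
--         else:
--             lo = mid + 1
--     i = lo
--     j = k - (i - 1) * i // 2 - 1
--     return (i, j, pos)
--
-- def get_matching(model):
--     """Retrieve a matching from the model of a CNF with symmetry and ensure it is valid."""
--     matching = {}
--     for a, b, positive in map(get_ij_from_k_fast, model):
--         if positive:
--             if matching.setdefault(a, b) != b: raise ValueError("Matching inconsistant1")
--             if matching.setdefault(b, a) != a: raise ValueError("Matching inconsistant2")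
--         else:
--             if matching.get(a) == b or matching.get(b) == a:
--                 raise ValueError("Matching inconsistant3")
--     return matching
-- ===== Notes on version B (the rewrite author's own statement) =====
-- stated objective: faster
-- what changed: B inverts the triangular numbering with an O(log k) binary search instead of A's O(sqrt(k)) linear increment loop, and folds A's four-way dict membership/lookup checks into setdefault/get; Pre_ excludes exactly the inconsistent models on which A raises ValueError.
import Mathlib
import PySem

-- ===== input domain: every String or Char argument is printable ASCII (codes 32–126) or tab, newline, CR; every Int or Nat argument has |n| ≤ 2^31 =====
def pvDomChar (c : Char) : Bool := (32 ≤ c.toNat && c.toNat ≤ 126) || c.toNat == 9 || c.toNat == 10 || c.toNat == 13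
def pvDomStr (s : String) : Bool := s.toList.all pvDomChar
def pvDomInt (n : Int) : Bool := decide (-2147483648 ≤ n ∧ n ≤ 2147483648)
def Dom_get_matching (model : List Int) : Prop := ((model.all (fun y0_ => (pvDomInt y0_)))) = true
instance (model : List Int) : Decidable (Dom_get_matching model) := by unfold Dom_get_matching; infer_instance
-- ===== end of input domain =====

-- B replaces A's O(√k) linear scan for the triangular index i with an O(log k) binary
-- search and folds A's four dict membership/lookup checks into setdefault/get; the
-- return value is identical wherever A returns (A's ValueError inputs are outside Pre_).

-- ===== PORT A =====

-- termination of the 'while k > i*(i+1)/2: i += 1' loop: the loop condition forces k > i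
theorem pv_findI_dec (k i : Int) (h : 2 * k > i * (i + 1)) : (k - (i + 1)).toNat < (k - i).toNat := by
  have hii : i ≤ i * i := by
    rcases (by omega : i ≤ 0 ∨ 1 ≤ i) with h0 | h0
    · exact le_trans h0 (mul_self_nonneg i)
    · nlinarith
  have : i < k := by nlinarith
  omega

-- 'i = 1; while k > i*(i+1)/2: i += 1' — the comparison 'k > i*(i+1)/2' is exact as
-- '2*k > i*(i+1)' (Python's float halves are exact here: all values < 2^53)
def findI (k i : Int) : Int :=
  if h : 2 * k > i * (i + 1) then findI k (i + 1) else i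
termination_by (k - i).toNat
decreasing_by exact pv_findI_dec k i h

-- 'j = int(k - (i-1)*i/2 - 1)' is exact integer arithmetic: (i-1)*i is even and nonneg
def get_ij_from_k (k : Int) : Int × Int × Bool :=
  let pos := decide (k > 0)
  let k' := |k|
  let i := findI k' 1
  let j := k' - PySem.Int.floordiv ((i - 1) * i) 2 - 1
  (i, j, pos)

-- the for-loop over model; 'none' marks the ValueError paths (excluded by Pre_)
def loopA (m : PySem.Dict Int Int) (l : List Int) : Option (PySem.Dict Int Int) :=
  match l with
  | [] => some m
  | var :: rest =>
    match get_ij_from_k var with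
    | (a, b, positive) =>
      if positive then
        -- if a in matching and matching[a] != b: raise  else: matching[a] = b
        if (m.get? a).isSome && !(m.get? a == some b) then none
        else
          let m1 := m.insert a b
          -- if b in matching and matching[b] != a: raise  else: matching[b] = a
          if (m1.get? b).isSome && !(m1.get? b == some a) then none
          else loopA (m1.insert b a) rest
      else
        -- if a in matching and matching[a] == b: raise
        if m.get? a == some b then none
        -- if b in matching and matching[b] == a: raise
        else if m.get? b == some a then none
        else loopA m rest

def get_matching (model : List Int) : List (Int × Int) :=
  match loopA PySem.Dict.empty model with
  | some m => m.items
  | none => []        -- unreachable under Pre_: Python raises ValueError here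

-- ===== PORT B =====

-- binary-search loop of Source B: 'while lo < hi: mid = (lo+hi)//2; ...'
def bsearchI (k lo hi : Int) : Int :=
  if h : lo < hi then
    let mid := PySem.Int.floordiv (lo + hi) 2
    if 2 * k ≤ mid * (mid + 1) then bsearchI k lo mid
    else bsearchI k (mid + 1) hi
  else lo
termination_by (hi - lo).toNat
decreasing_by
  · have h2 : PySem.Int.floordiv (lo + hi) 2 < hi :=
      (PySem.Int.floordiv_lt_iff_lt_mul (by norm_num : (0:Int) < 2)).2 (by omega)
    omega
  · have h1 := (PySem.Int.floordiv_two_mid_bounds (le_of_lt h)).1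
    omega

def get_ij_from_k_fast (k : Int) : Int × Int × Bool :=
  let pos := decide (k > 0)
  let k' := |k|
  let hi := if k' > 1 then k' else 1
  let i := bsearchI k' 1 hi
  let j := k' - PySem.Int.floordiv ((i - 1) * i) 2 - 1
  (i, j, pos)

-- the for-loop of Source B over the decoded triples
def loopB (m : PySem.Dict Int Int) (l : List (Int × Int × Bool)) : Option (PySem.Dict Int Int) :=
  match l with
  | [] => some m
  | (a, b, positive) :: rest =>
    if positive then
      -- if matching.setdefault(a, b) != b: raise
      let va := (m.get? a).getD b
      let m1 := m.setdefault a b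
      if va != b then none
      else
        -- if matching.setdefault(b, a) != a: raise
        let vb := (m1.get? b).getD a
        let m2 := m1.setdefault b a
        if vb != a then none
        else loopB m2 rest
    else
      -- if matching.get(a) == b or matching.get(b) == a: raise
      if m.get? a == some b || m.get? b == some a then none
      else loopB m rest

def get_matching_alt (model : List Int) : List (Int × Int) :=
  match loopB PySem.Dict.empty (model.map get_ij_from_k_fast) with
  | some m => m.items
  | none => []        -- unreachable under Pre_: Python raises ValueError here

-- ===== PRECONDITION & SPEC =====

-- integer square root (digit-by-digit on base-4 digits; exact for n < 4^64), used
-- only to STATE the decoded literal below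
def pvSqrtAux : Nat → Nat → Nat
  | 0, _ => 0
  | f+1, n => if n = 0 then 0 else
      let r := 2 * pvSqrtAux f (n / 4)
      if (r+1)*(r+1) ≤ n then r + 1 else r
def pvSqrt (n : Nat) : Nat := pvSqrtAux 64 n

-- the decoded literal of a SAT variable, in closed form (exact integer sqrt inversion
-- of the triangular numbering); used only to STATE which models are consistent
def pvDec (v : Int) : Int × Int × Bool :=
  let k := |v|
  let i : Int := if k ≤ 1 then 1 else ((pvSqrt (8 * k.toNat - 7) + 1) / 2 : Nat)
  (i, k - PySem.Int.floordiv ((i - 1) * i) 2 - 1, decide (v > 0))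

-- Pre_ = exactly the models on which Python A returns (no ValueError): all positive
-- literals describe one consistent partial matching, and no negative literal is
-- preceded by the positive literal of the same pair.
def Pre_get_matching (model : List Int) : Prop :=
  (∀ p ∈ model.map pvDec, ∀ q ∈ model.map pvDec, p.2.2 = true → q.2.2 = true →
      ((p.1 = q.1 → p.2.1 = q.2.1) ∧ (p.2.1 = q.2.1 → p.1 = q.1) ∧ (p.1 = q.2.1 → p.2.1 = q.1))) ∧
  (∀ p ∈ (model.map pvDec).zipIdx, ∀ q ∈ (model.map pvDec).zipIdx,
      p.2 < q.2 → p.1.2.2 = true → q.1.2.2 = false →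
      ¬(p.1.1 = q.1.1 ∧ p.1.2.1 = q.1.2.1))
instance (model : List Int) : Decidable (Pre_get_matching model) := by
  unfold Pre_get_matching; infer_instance

def pvWitness_get_matching : List Int := [1, -3]

def Spec_get_matching (model : List Int) (out : List (Int × Int)) : Prop := out = get_matching_alt model
instance (model : List Int) (out : List (Int × Int)) : Decidable (Spec_get_matching model out) := by unfold Spec_get_matching; infer_instance

-- ===== CLAIM (what is proved, stated in full; the proofs are below) =====
def Claim_equal_get_matching : Prop := ∀ (model : List Int), Dom_get_matching model → Pre_get_matching model → Spec_get_matching model (get_matching model)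

-- ===== LEMMAS AND PROOFS =====

theorem findI_ge (k i : Int) : i ≤ findI k i := by
  induction i using findI.induct (k := k) with
  | case1 i h ih => rw [findI, dif_pos h]; omega
  | case2 i h => rw [findI, dif_neg h]

theorem findI_sat (k i : Int) : 2 * k ≤ findI k i * (findI k i + 1) := by
  induction i using findI.induct (k := k) with
  | case1 i h ih => rw [findI, dif_pos h]; exact ih
  | case2 i h => rw [findI, dif_neg h]; omega

theorem findI_min (k i : Int) : ∀ m, i ≤ m → m < findI k i → 2 * k > m * (m + 1) := by
  induction i using findI.induct (k := k) with
  | case1 i h ih =>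
    intro m hm1 hm2
    rcases (by omega : i = m ∨ i + 1 ≤ m) with rfl | hm3
    · exact h
    · rw [findI, dif_pos h] at hm2
      exact ih m hm3 hm2
  | case2 i h =>
    intro m hm1 hm2
    rw [findI, dif_neg h] at hm2
    omega

theorem bsearch_eq (k : Int) : ∀ (lo hi j : Int), 1 ≤ lo → lo ≤ j → j ≤ hi →
    2 * k ≤ j * (j + 1) → (∀ m, lo ≤ m → m < j → 2 * k > m * (m + 1)) →
    bsearchI k lo hi = j := by
  intro lo hi
  induction lo, hi using bsearchI.induct (k := k) with
  | case1 lo hi h mid hP ih =>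
    intro j h0 h1 h2 hj hmin
    have hmid : mid = PySem.Int.floordiv (lo + hi) 2 := rfl
    rw [bsearchI, dif_pos h]
    show (if 2 * k ≤ mid * (mid + 1) then bsearchI k lo mid else bsearchI k (mid + 1) hi) = j
    rw [if_pos hP]
    have hb := PySem.Int.floordiv_two_mid_bounds (le_of_lt h)
    rw [← hmid] at hb
    have hjm : j ≤ mid := by
      by_contra hc
      exact absurd hP (by have := hmin mid (by omega) (by omega); omega)
    exact ih j h0 h1 hjm hj hmin
  | case2 lo hi h mid hP ih =>
    intro j h0 h1 h2 hj hmin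
    have hmid : mid = PySem.Int.floordiv (lo + hi) 2 := rfl
    rw [bsearchI, dif_pos h]
    show (if 2 * k ≤ mid * (mid + 1) then bsearchI k lo mid else bsearchI k (mid + 1) hi) = j
    rw [if_neg hP]
    have hb := PySem.Int.floordiv_two_mid_bounds (le_of_lt h)
    rw [← hmid] at hb
    have hjm : mid + 1 ≤ j := by
      by_contra hc
      have hjmid : j ≤ mid := by omega
      have : j * (j + 1) ≤ mid * (mid + 1) := by nlinarith
      omega
    exact ih j (by omega) hjm h2 hj (fun m hm1 hm2 => hmin m (by omega) hm2)
  | case3 lo hi h =>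
    intro j h0 h1 h2 hj hmin
    rw [bsearchI, dif_neg h]
    omega

theorem searchI_eq (k' : Int) : findI k' 1 = bsearchI k' 1 (if k' > 1 then k' else 1) := by
  by_cases h1 : k' > 1
  · rw [if_pos h1]
    refine (bsearch_eq k' 1 k' (findI k' 1) le_rfl (findI_ge k' 1) ?_ (findI_sat k' 1) (findI_min k' 1)).symm
    by_contra hc
    have := findI_min k' 1 k' (by omega) (by omega)
    nlinarith
  · rw [if_neg h1]
    rw [findI, dif_neg (by nlinarith), bsearchI, dif_neg (by omega)]

theorem decode_eq (v : Int) : get_ij_from_k v = get_ij_from_k_fast v := by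
  simp only [get_ij_from_k, get_ij_from_k_fast, searchI_eq]

theorem insert_eq_self (m : PySem.Dict Int Int) (x y : Int) (hn : m.keys.Nodup)
    (h : m.get? x = some y) : m.insert x y = m := by
  have hc : m.contains x = true := by rw [PySem.Dict.contains_eq_isSome_get?, h]; rfl
  apply PySem.Dict.ext
  rw [PySem.Dict.items_insert_of_contains m y hc]
  conv_rhs => rw [← List.map_id m.items]
  apply List.map_congr_left
  intro p hp
  obtain ⟨p1, p2⟩ := p
  by_cases hpx : p1 = x
  · subst hpx
    have h2 : m.get? p1 = some p2 := PySem.Dict.get?_of_mem_items m hp hn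
    rw [h] at h2
    simp [Option.some_inj.mp h2]
  · simp [hpx]

theorem setdefault_eq_insert (m : PySem.Dict Int Int) (x y : Int) (hn : m.keys.Nodup)
    (h : (m.get? x).getD y = y) : m.setdefault x y = m.insert x y := by
  by_cases hc : m.contains x = true
  · have hs : m.get? x = some y := by
      rw [PySem.Dict.contains_eq_isSome_get?] at hc
      cases hg : m.get? x with
      | none => rw [hg] at hc; simp at hc
      | some w => rw [hg] at h; simp at h; rw [h]
    rw [insert_eq_self m x y hn hs]
    simp [PySem.Dict.setdefault, hc]
  · simp [PySem.Dict.setdefault, PySem.Dict.insert, hc]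

-- one positive half-step: A's membership test + insert agrees with B's setdefault
theorem half_eq (m : PySem.Dict Int Int) (hn : m.keys.Nodup) (x y : Int)
    (f g : PySem.Dict Int Int → Option (PySem.Dict Int Int))
    (hfg : ∀ d, d.keys.Nodup → f d = g d) :
    (if (m.get? x).isSome && !(m.get? x == some y) then none else f (m.insert x y)) =
    (if (m.get? x).getD y != y then none else g (m.setdefault x y)) := by
  cases hg : m.get? x with
  | none =>
    rw [setdefault_eq_insert m x y hn (by simp [hg])]
    simp [hfg _ (PySem.Dict.nodup_keys_insert _ _ _ hn)]
  | some w =>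
    by_cases hw : w = y
    · subst hw
      rw [setdefault_eq_insert m x w hn (by simp [hg])]
      simp [hfg _ (PySem.Dict.nodup_keys_insert _ _ _ hn)]
    · simp [hw, bne]

theorem loop_eq (l : List Int) : ∀ (m : PySem.Dict Int Int), m.keys.Nodup →
    loopA m l = loopB m (l.map get_ij_from_k_fast) := by
  induction l with
  | nil => intro m hn; rfl
  | cons var rest ih =>
    intro m hn
    rw [List.map_cons]
    rcases ht : get_ij_from_k_fast var with ⟨a, b, p⟩
    simp only [loopA, decode_eq var, ht, loopB]
    cases p
    · -- negative literal: the two checks against A's or-check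
      cases hA : (m.get? a == some b) <;> cases hB : (m.get? b == some a) <;>
        simp_all [ih m hn]
    · -- positive literal: two half-steps
      exact half_eq m hn a b _ _ (fun d hd => half_eq d hd b a _ _ (fun d2 h2 => ih d2 h2))

-- ===== VERDICT (by name: the statement is the Claim_ definition above) =====
theorem get_matching_spec : Claim_equal_get_matching := by
  intro model _ _
  unfold Spec_get_matching get_matching get_matching_alt
  rw [loop_eq model PySem.Dict.empty (by simp [PySem.Dict.empty])]
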